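-- pv_equiv track=rewrite | github.com/BattleWoLFz99/Data-Structures-and-Algorithms-in-Python | by Days/W71 同向双指针/2 3. ml1375 Substring With At Least K Distinct Characters.py | kDistinctCharacters
-- ===== SOURCE A (Python) =====
-- def kDistinctCharacters(s, k):
--     # Write your code here
--     if not s or len(s) < k:
--         return -1
--
--     counter = dict()
--     j, n, ans = 0, len(s), 0
--     for i in range(n):
--         while j < n and len(counter) < k:
--             counter[s[j]] = counter.get(s[j], 0) + 1
--             j += 1
--         if len(counter) >= k:
--             ans = ans + (n - (j - i) + 1) - i
--         counter[s[i]] -= 1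
--         if counter[s[i]] == 0:
--             del counter[s[i]]
--
--     return ans
-- ===== SOURCE B (Python) =====
-- def kDistinctCharacters(s, k):
--     # Per-start scan: for each start i, grow a set of seen characters until it
--     # holds k distinct ones; every extension of that minimal window also has
--     # >= k distinct characters, so start i contributes n - j + 1 substrings.
--     if not s or len(s) < k:
--         return -1
--     n = len(s)
--     ans = 0
--     for i in range(n):
--         seen = set()
--         j = i
--         while j < n and len(seen) < k:
--             seen.add(s[j])
--             j += 1
--         if len(seen) >= k:
--             ans += n - j + 1
--     return ans
-- ===== Notes on version B (the rewrite author's own statement) =====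
-- stated objective: alternative
-- what changed: Replaces the single sliding window with a shared frequency dict (extend right pointer, then decrement/delete the left character each iteration) by an independent per-start scan that regrows a plain set of seen characters from scratch for each start index, trading A's amortized O(n) window bookkeeping for a stateless O(n*min(n,k)) scan.
import Mathlib
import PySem

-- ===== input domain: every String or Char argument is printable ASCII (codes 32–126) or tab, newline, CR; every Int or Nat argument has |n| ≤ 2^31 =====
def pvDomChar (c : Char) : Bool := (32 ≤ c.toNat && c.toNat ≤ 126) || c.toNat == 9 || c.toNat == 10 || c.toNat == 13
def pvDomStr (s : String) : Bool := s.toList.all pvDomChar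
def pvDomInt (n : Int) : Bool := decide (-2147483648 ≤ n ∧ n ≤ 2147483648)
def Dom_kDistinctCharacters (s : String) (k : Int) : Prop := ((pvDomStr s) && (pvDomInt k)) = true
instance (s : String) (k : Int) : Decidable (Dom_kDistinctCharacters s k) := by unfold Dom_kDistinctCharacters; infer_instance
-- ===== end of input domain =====

-- B replaces A's single sliding window (shared frequency dict, decremented at the left end each
-- iteration) by an independent per-start scan that regrows a plain set of seen characters for each
-- start index: a structurally different algorithm of similar cost, proved to return the same value.

-- ===== PORT A =====

-- A's inner `while j < n and len(counter) < k:` loop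
def kdcExtend (l : List Char) (k : Int) (counter : PySem.Dict Char Int) (j : Int) :
    PySem.Dict Char Int × Int :=
  if h : j < (l.length : Int) ∧ (counter.size : Int) < k then
    let c := PySem.List.pyGetD l j ' '   -- s[j]; 0 ≤ j < n at every reachable call
    kdcExtend l k (counter.insert c (counter.getD c 0 + 1)) (j + 1)
  else (counter, j)
termination_by ((l.length : Int) - j).toNat
decreasing_by omega

-- A's `for i in range(n)` body, state = (counter, j, ans)
def kdcStepA (l : List Char) (n k : Int) (st : PySem.Dict Char Int × Int × Int) (i : Int) :
    PySem.Dict Char Int × Int × Int :=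
  let cj := kdcExtend l k st.1 st.2.1
  let counter := cj.1
  let j := cj.2
  let ans := if k ≤ (counter.size : Int) then st.2.2 + (n - (j - i) + 1) - i else st.2.2
  let c := PySem.List.pyGetD l i ' '   -- s[i]
  -- `counter[s[i]] -= 1` raises KeyError when s[i] is absent (only when k ≤ 0); Pre_ excludes that
  let counter := counter.insert c (counter.getD c 0 - 1)
  let counter := if counter.getD c 0 = 0 then counter.erase c else counter
  (counter, j, ans)

def kDistinctCharacters (s : String) (k : Int) : Int :=
  if s.toList = [] ∨ (s.toList.length : Int) < k then -1
  else
    ((PySem.List.pyRange 0 (s.toList.length : Int) 1).foldl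
        (kdcStepA s.toList (s.toList.length : Int) k) (PySem.Dict.empty, 0, 0)).2.2

-- ===== PORT B =====

-- B's inner `while j < n and len(seen) < k:` loop
def kdcScan (l : List Char) (k : Int) (seen : PySem.Set Char) (j : Int) :
    PySem.Set Char × Int :=
  if h : j < (l.length : Int) ∧ PySem.Set.len seen < k then
    kdcScan l k (PySem.Set.add seen (PySem.List.pyGetD l j ' ')) (j + 1)
  else (seen, j)
termination_by ((l.length : Int) - j).toNat
decreasing_by omega

-- B's `for i in range(n)` body, state = ans
def kdcStepB (l : List Char) (n k : Int) (ans : Int) (i : Int) : Int :=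
  let sj := kdcScan l k PySem.Set.empty i
  if k ≤ PySem.Set.len sj.1 then ans + (n - sj.2 + 1) else ans

def kDistinctCharacters_alt (s : String) (k : Int) : Int :=
  if s.toList = [] ∨ (s.toList.length : Int) < k then -1
  else
    (PySem.List.pyRange 0 (s.toList.length : Int) 1).foldl
      (kdcStepB s.toList (s.toList.length : Int) k) 0

-- ===== PRECONDITION & SPEC =====
-- Pre_ excludes exactly the inputs where A raises KeyError (nonempty s with k ≤ 0: the window never
-- holds k distinct characters, so `counter[s[i]] -= 1` hits an empty dict); A returns on all of Pre_.
def Pre_kDistinctCharacters (s : String) (k : Int) : Prop := s = "" ∨ 1 ≤ k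
instance (s : String) (k : Int) : Decidable (Pre_kDistinctCharacters s k) := by
  unfold Pre_kDistinctCharacters; infer_instance

def pvWitness_kDistinctCharacters : String × Int := ("abcab", 2)

def Spec_kDistinctCharacters (s : String) (k : Int) (out : Int) : Prop := out = kDistinctCharacters_alt s k
instance (s : String) (k : Int) (out : Int) : Decidable (Spec_kDistinctCharacters s k out) := by unfold Spec_kDistinctCharacters; infer_instance

-- ===== CLAIM (what is proved, stated in full; the proofs are below) =====
def Claim_equal_kDistinctCharacters : Prop := ∀ (s : String) (k : Int), Dom_kDistinctCharacters s k → Pre_kDistinctCharacters s k → Spec_kDistinctCharacters s k (kDistinctCharacters s k)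

-- ===== LEMMAS AND PROOFS =====

-- the window s[i:j] as a list of characters
def kdcWin (l : List Char) (i j : Nat) : List Char := (l.drop i).take (j - i)

-- number of distinct characters of a window
def kdcDst (w : List Char) : Nat := (PySem.Set.ofList w).length

-- the counter dict represents exactly the character multiset of the window w
def kdcRep (d : PySem.Dict Char Int) (w : List Char) : Prop :=
  d.keys.Nodup ∧ ∀ c : Char, d.get? c = if w.count c = 0 then none else some (w.count c : Int)

-- the common stopping point of both inner while loops, as a pure recursion on window contents
def kdcStop (l : List Char) (k : Int) (i j : Nat) : Nat :=
  if h : j < l.length ∧ (kdcDst (kdcWin l i j) : Int) < k then kdcStop l k i (j + 1) else j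
termination_by l.length - j
decreasing_by omega

lemma kdcWin_self (l : List Char) (i : Nat) : kdcWin l i i = [] := by simp [kdcWin]

lemma kdcWin_append (l : List Char) (i j : Nat) (hij : i ≤ j) (hjl : j < l.length) :
    kdcWin l i (j + 1) = kdcWin l i j ++ [l[j]] := by
  unfold kdcWin
  have h1 : j + 1 - i = (j - i) + 1 := by omega
  have h2 : j - i < (l.drop i).length := by simp; omega
  rw [h1, List.take_add_one, List.getElem?_eq_getElem h2]
  simp [List.getElem_drop]
  congr 1
  omega

lemma kdcWin_cons (l : List Char) (i j : Nat) (hij : i < j) (hil : i < l.length) :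
    kdcWin l i j = l[i] :: kdcWin l (i + 1) j := by
  unfold kdcWin
  rw [List.drop_eq_getElem_cons hil]
  have h1 : j - i = (j - (i + 1)) + 1 := by omega
  rw [h1, List.take_succ_cons]

lemma kdcOfList_append (w : List Char) (c : Char) :
    PySem.Set.ofList (w ++ [c]) = PySem.Set.add (PySem.Set.ofList w) c := by
  simp [PySem.Set.ofList_eq_foldl, List.foldl_append]

lemma kdcDst_tail_le (l : List Char) (i m : Nat) (him : i < m) (hil : i < l.length) :
    kdcDst (kdcWin l (i + 1) m) ≤ kdcDst (kdcWin l i m) := by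
  rw [kdcWin_cons l i m him hil]
  unfold kdcDst
  have hsub : PySem.Set.ofList (kdcWin l (i + 1) m) ⊆
      PySem.Set.ofList (l[i] :: kdcWin l (i + 1) m) := by
    intro x hx
    rw [PySem.Set.mem_ofList] at hx ⊢
    exact List.mem_cons_of_mem _ hx
  exact ((PySem.Set.nodup_ofList _).subperm hsub).length_le

lemma kdcRep_empty : kdcRep PySem.Dict.empty [] := by
  refine ⟨PySem.Dict.nodup_keys_empty, fun c => ?_⟩
  simp [PySem.Dict.get?_empty]

lemma kdcRep_size {d : PySem.Dict Char Int} {w : List Char} (h : kdcRep d w) :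
    d.size = kdcDst w := by
  obtain ⟨hnd, hget⟩ := h
  have hlen : d.size = d.keys.length := by
    simp [PySem.Dict.size, PySem.Dict.keys]
  have hperm : d.keys.Perm (PySem.Set.ofList w) := by
    rw [List.perm_ext_iff_of_nodup hnd (PySem.Set.nodup_ofList w)]
    intro c
    rw [PySem.Set.mem_ofList]
    constructor
    · intro hc
      have htrue : d.contains c = true := (PySem.Dict.contains_iff_mem_keys d c).mpr hc
      by_contra hcw
      have hcnt : w.count c = 0 := List.count_eq_zero.mpr hcw
      have hnone : d.get? c = none := by rw [hget c, if_pos hcnt]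
      rw [PySem.Dict.get?_eq_none_iff_contains] at hnone
      rw [htrue] at hnone
      simp at hnone
    · intro hc
      have hcnt : w.count c ≠ 0 := by
        simpa [List.count_eq_zero] using hc
      have : d.get? c = some (w.count c : Int) := by rw [hget c, if_neg hcnt]
      have hcon : ¬ d.contains c = false := by
        rw [← PySem.Dict.get?_eq_none_iff_contains, this]
        simp
      rw [← PySem.Dict.contains_iff_mem_keys]
      revert hcon
      cases d.contains c <;> simp
  rw [hlen, hperm.length_eq]
  rfl

lemma kdc_find?_filter (L : List (Char × Int)) (k k' : Char) :
    List.find? (fun p => p.1 == k') (List.filter (fun p => !(p.1 == k)) L) =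
      if k' = k then none else List.find? (fun p => p.1 == k') L := by
  induction L with
  | nil => simp
  | cons x xs ih =>
    by_cases hk : x.1 = k
    · rw [List.filter_cons, if_neg (by simp [hk]), ih]
      by_cases h : k' = k
      · simp [h]
      · rw [if_neg h, if_neg h, List.find?_cons_of_neg]
        simp [hk]
        exact fun hh => h hh.symm
    · rw [List.filter_cons, if_pos (by simp [hk])]
      by_cases hk' : x.1 = k'
      · have h : ¬ k' = k := fun hh => hk (by rw [hk', hh])
        rw [if_neg h, List.find?_cons_of_pos (by simp [hk']),
          List.find?_cons_of_pos (by simp [hk'])]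
      · rw [List.find?_cons_of_neg (by simp [hk']), ih]
        by_cases h : k' = k
        · simp [h]
        · rw [if_neg h, if_neg h, List.find?_cons_of_neg (by simp [hk'])]

lemma kdc_get?_erase (d : PySem.Dict Char Int) (k k' : Char) :
    (d.erase k).get? k' = if k' = k then none else d.get? k' := by
  show Option.map (fun x => x.2) (List.find? (fun p => p.1 == k') (List.filter (fun p => !(p.1 == k)) d.items)) = _
  rw [kdc_find?_filter]
  split_ifs
  · rfl
  · rfl

lemma kdc_nodup_keys_erase (d : PySem.Dict Char Int) (k : Char) (h : d.keys.Nodup) :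
    (d.erase k).keys.Nodup := by
  have hsub : (d.erase k).keys.Sublist d.keys := by
    show (List.map (fun p => p.1) (List.filter (fun p => !(p.1 == k)) d.items)).Sublist
        (List.map (fun p => p.1) d.items)
    exact List.Sublist.map _ List.filter_sublist
  exact h.sublist hsub

lemma kdcRep_getD {d : PySem.Dict Char Int} {w : List Char} (h : kdcRep d w) (c : Char) :
    d.getD c 0 = (w.count c : Int) := by
  rw [PySem.Dict.getD_eq_get?_getD, h.2 c]
  by_cases hc : w.count c = 0 <;> simp [hc]

lemma kdcRep_insert {d : PySem.Dict Char Int} {w : List Char} (h : kdcRep d w) (c : Char) :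
    kdcRep (d.insert c (d.getD c 0 + 1)) (w ++ [c]) := by
  refine ⟨PySem.Dict.nodup_keys_insert _ _ _ h.1, fun c' => ?_⟩
  rw [PySem.Dict.get?_insert]
  by_cases hc : c' = c
  · subst hc
    rw [if_pos rfl, kdcRep_getD h c']
    have h1 : (w ++ [c']).count c' = w.count c' + 1 := by simp
    rw [h1, if_neg (by omega)]
    push_cast
    ring_nf
  · have h1 : (w ++ [c]).count c' = w.count c' := by
      have h2 : List.count c' [c] = 0 := List.count_eq_zero.mpr (by simp [hc])
      rw [List.count_append, h2]
      omega
    rw [if_neg hc, h.2 c', h1]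

lemma kdcRep_remove {d : PySem.Dict Char Int} {w : List Char} {c : Char}
    (h : kdcRep d (c :: w)) :
    kdcRep (if (d.insert c (d.getD c 0 - 1)).getD c 0 = 0
            then (d.insert c (d.getD c 0 - 1)).erase c
            else d.insert c (d.getD c 0 - 1)) w := by
  have hgd : d.getD c 0 = ((c :: w).count c : Int) := kdcRep_getD h c
  have hcnt : (c :: w).count c = w.count c + 1 := by simp
  have hget1 : ∀ c', (d.insert c (d.getD c 0 - 1)).get? c' =
      if c' = c then some (w.count c : Int) else d.get? c' := by
    intro c'
    rw [PySem.Dict.get?_insert]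
    by_cases hc : c' = c
    · rw [if_pos hc, if_pos hc, hgd, hcnt]
      push_cast
      ring_nf
    · rw [if_neg hc, if_neg hc]
  have hgd1 : (d.insert c (d.getD c 0 - 1)).getD c 0 = (w.count c : Int) := by
    rw [PySem.Dict.getD_eq_get?_getD, hget1 c, if_pos rfl]
    rfl
  have hnd1 : (d.insert c (d.getD c 0 - 1)).keys.Nodup :=
    PySem.Dict.nodup_keys_insert _ _ _ h.1
  have hcount : ∀ c', c' ≠ c → (c :: w).count c' = w.count c' := by
    intro c' hc
    have h2 : List.count c' [c] = 0 := List.count_eq_zero.mpr (by simp [hc])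
    have h3 : (c :: w) = [c] ++ w := rfl
    rw [h3, List.count_append, h2, Nat.zero_add]
  by_cases h0 : w.count c = 0
  · rw [if_pos (by rw [hgd1, h0]; rfl)]
    refine ⟨kdc_nodup_keys_erase _ _ hnd1, fun c' => ?_⟩
    rw [kdc_get?_erase]
    by_cases hc : c' = c
    · rw [if_pos hc, hc, if_pos h0]
    · rw [if_neg hc, hget1 c', if_neg hc, h.2 c', hcount c' hc]
  · rw [if_neg (by rw [hgd1]; exact_mod_cast h0)]
    refine ⟨hnd1, fun c' => ?_⟩
    rw [hget1 c']
    by_cases hc : c' = c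
    · rw [if_pos hc, hc, if_neg h0]
    · rw [if_neg hc, h.2 c', hcount c' hc]

lemma kdcStop_le (l : List Char) (k : Int) (i : Nat) :
    ∀ fuel j, l.length - j = fuel → j ≤ l.length →
      j ≤ kdcStop l k i j ∧ kdcStop l k i j ≤ l.length := by
  intro fuel
  induction fuel with
  | zero =>
    intro j hf hj
    rw [kdcStop, dif_neg (by omega)]
    exact ⟨le_refl _, hj⟩
  | succ f ih =>
    intro j hf hj
    by_cases hg : j < l.length ∧ (kdcDst (kdcWin l i j) : Int) < k
    · rw [kdcStop, dif_pos hg]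
      have := ih (j + 1) (by omega) (by omega)
      exact ⟨by omega, this.2⟩
    · rw [kdcStop, dif_neg hg]
      exact ⟨le_refl _, hj⟩

lemma kdcStop_guard (l : List Char) (k : Int) (i : Nat) :
    ∀ fuel j, l.length - j = fuel →
      ∀ m, j ≤ m → m < kdcStop l k i j → (kdcDst (kdcWin l i m) : Int) < k := by
  intro fuel
  induction fuel with
  | zero =>
    intro j hf m hjm hm
    rw [kdcStop, dif_neg (by omega)] at hm
    omega
  | succ f ih =>
    intro j hf m hjm hm
    by_cases hg : j < l.length ∧ (kdcDst (kdcWin l i j) : Int) < k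
    · rw [kdcStop, dif_pos hg] at hm
      by_cases hjm' : j = m
      · exact hjm' ▸ hg.2
      · exact ih (j + 1) (by omega) m (by omega) hm
    · rw [kdcStop, dif_neg hg] at hm
      omega

lemma kdcStop_pass (l : List Char) (k : Int) (i j : Nat) (hjl : j ≤ l.length) :
    ∀ fuel m, j - m = fuel → m ≤ j →
      (∀ m', m ≤ m' → m' < j → (kdcDst (kdcWin l i m') : Int) < k) →
      kdcStop l k i m = kdcStop l k i j := by
  intro fuel
  induction fuel with
  | zero =>
    intro m hf hmj _
    have : m = j := by omega
    rw [this]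
  | succ f ih =>
    intro m hf hmj hgd
    have hg : m < l.length ∧ (kdcDst (kdcWin l i m) : Int) < k :=
      ⟨by omega, hgd m (le_refl _) (by omega)⟩
    conv_lhs => rw [kdcStop]
    rw [dif_pos hg]
    exact ih (m + 1) (by omega) (by omega) (fun m' h1 h2 => hgd m' (by omega) h2)

lemma kdcExtend_spec (l : List Char) (k : Int) (i : Nat) :
    ∀ fuel j (d : PySem.Dict Char Int), l.length - j = fuel → i ≤ j → j ≤ l.length →
      kdcRep d (kdcWin l i j) →
      (kdcExtend l k d (j : Int)).2 = (kdcStop l k i j : Int) ∧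
      kdcRep (kdcExtend l k d (j : Int)).1 (kdcWin l i (kdcStop l k i j)) := by
  intro fuel
  induction fuel with
  | zero =>
    intro j d hf hij hjl hrep
    rw [kdcExtend, dif_neg (by push Not; intro h; omega), kdcStop, dif_neg (by omega)]
    exact ⟨rfl, hrep⟩
  | succ f ih =>
    intro j d hf hij hjl hrep
    by_cases hg : j < l.length ∧ (kdcDst (kdcWin l i j) : Int) < k
    · have hg' : (j : Int) < (l.length : Int) ∧ ((d.size : Int)) < k := by
        constructor
        · exact_mod_cast hg.1
        · rw [kdcRep_size hrep]; exact hg.2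
      rw [kdcExtend, dif_pos hg']
      rw [kdcStop, dif_pos hg]
      have hc : PySem.List.pyGetD l (j : Int) ' ' = l[j]'hg.1 := by
        rw [PySem.List.pyGetD_natCast]
        exact List.getD_eq_getElem l ' ' hg.1
      have hrep' : kdcRep (d.insert (PySem.List.pyGetD l (j : Int) ' ')
          (d.getD (PySem.List.pyGetD l (j : Int) ' ') 0 + 1)) (kdcWin l i (j + 1)) := by
        rw [hc, kdcWin_append l i j hij hg.1]
        exact kdcRep_insert hrep _
      have hcast : (j : Int) + 1 = ((j + 1 : Nat) : Int) := by push_cast; ring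
      rw [hcast]
      exact ih (j + 1) _ (by omega) (by omega) (by omega) hrep'
    · rw [kdcExtend, dif_neg (by
          push Not
          intro h1
          rw [kdcRep_size hrep]
          push Not at hg
          exact hg (by exact_mod_cast h1)),
        kdcStop, dif_neg hg]
      exact ⟨rfl, hrep⟩

lemma kdcScan_spec (l : List Char) (k : Int) (i : Nat) :
    ∀ fuel j, l.length - j = fuel → i ≤ j → j ≤ l.length →
      kdcScan l k (PySem.Set.ofList (kdcWin l i j)) (j : Int) =
        (PySem.Set.ofList (kdcWin l i (kdcStop l k i j)), (kdcStop l k i j : Int)) := by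
  intro fuel
  induction fuel with
  | zero =>
    intro j hf hij hjl
    rw [kdcScan, dif_neg (by push Not; intro h; omega), kdcStop, dif_neg (by omega)]
  | succ f ih =>
    intro j hf hij hjl
    have hlen : PySem.Set.len (PySem.Set.ofList (kdcWin l i j)) = (kdcDst (kdcWin l i j) : Int) := by
      rw [PySem.Set.len_eq]; rfl
    by_cases hg : j < l.length ∧ (kdcDst (kdcWin l i j) : Int) < k
    · have hg' : (j : Int) < (l.length : Int) ∧
          PySem.Set.len (PySem.Set.ofList (kdcWin l i j)) < k := by
        constructor
        · exact_mod_cast hg.1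
        · rw [hlen]; exact hg.2
      rw [kdcScan, dif_pos hg', kdcStop, dif_pos hg]
      have hc : PySem.List.pyGetD l (j : Int) ' ' = l[j]'hg.1 := by
        rw [PySem.List.pyGetD_natCast]
        exact List.getD_eq_getElem l ' ' hg.1
      have hset : PySem.Set.add (PySem.Set.ofList (kdcWin l i j)) (PySem.List.pyGetD l (j : Int) ' ')
          = PySem.Set.ofList (kdcWin l i (j + 1)) := by
        rw [hc, kdcWin_append l i j hij hg.1, kdcOfList_append]
      have hcast : (j : Int) + 1 = ((j + 1 : Nat) : Int) := by push_cast; ring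
      rw [hset, hcast]
      exact ih (j + 1) (by omega) (by omega) (by omega)
    · rw [kdcScan, dif_neg (by
          push Not
          intro h1
          rw [hlen]
          push Not at hg
          exact hg (by exact_mod_cast h1)),
        kdcStop, dif_neg hg]

lemma kdc_outer (l : List Char) (k : Int) (hk : 1 ≤ k) :
    ∀ fuel (i j : Nat) (d : PySem.Dict Char Int) (ans : Int),
      l.length - i = fuel → i ≤ j → j ≤ l.length →
      kdcRep d (kdcWin l i j) →
      (∀ m, i ≤ m → m < j → (kdcDst (kdcWin l i m) : Int) < k) →
      ((PySem.List.pyRange (i : Int) (l.length : Int) 1).foldl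
          (kdcStepA l (l.length : Int) k) (d, (j : Int), ans)).2.2 =
        (PySem.List.pyRange (i : Int) (l.length : Int) 1).foldl
          (kdcStepB l (l.length : Int) k) ans := by
  intro fuel
  induction fuel with
  | zero =>
    intro i j d ans hf hij hjl hrep hlt
    rw [PySem.List.pyRange_one_eq_nil (by omega)]
    rfl
  | succ f ih =>
    intro i j d ans hf hij hjl hrep hlt
    have hil : i < l.length := by omega
    rw [PySem.List.pyRange_one_cons (by omega), List.foldl_cons, List.foldl_cons]
    obtain ⟨hE2, hErep⟩ := kdcExtend_spec l k i (l.length - j) j d rfl hij hjl hrep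
    set stop := kdcStop l k i j with hstopdef
    have hpass : kdcStop l k i i = stop :=
      kdcStop_pass l k i j hjl (j - i) i rfl hij (fun m' h1 h2 => hlt m' h1 h2)
    have hscan : kdcScan l k PySem.Set.empty (i : Int) =
        (PySem.Set.ofList (kdcWin l i stop), (stop : Int)) := by
      have he : PySem.Set.empty = PySem.Set.ofList (kdcWin l i i) := by
        rw [kdcWin_self]
        rfl
      rw [he, kdcScan_spec l k i (l.length - i) i rfl (le_refl i) (by omega), hpass]
    have hstople := kdcStop_le l k i (l.length - j) j rfl hjl
    have hstrict : i + 1 ≤ stop := by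
      rw [← hpass, kdcStop, dif_pos ⟨hil, by rw [kdcWin_self]; exact (by norm_num; omega)⟩]
      exact (kdcStop_le l k i (l.length - (i + 1)) (i + 1) rfl (by omega)).1
    have hguard : ∀ m, i ≤ m → m < stop → (kdcDst (kdcWin l i m) : Int) < k := by
      intro m h1 h2
      by_cases hmj : m < j
      · exact hlt m h1 hmj
      · exact kdcStop_guard l k i (l.length - j) j rfl m (by omega) h2
    have hwin : kdcWin l i stop = l[i]'hil :: kdcWin l (i + 1) stop :=
      kdcWin_cons l i stop (by omega) hil
    have hc : PySem.List.pyGetD l (i : Int) ' ' = l[i]'hil := by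
      rw [PySem.List.pyGetD_natCast]
      exact List.getD_eq_getElem l ' ' hil
    have hsize : (((kdcExtend l k d (j : Int)).1.size : Int)) = (kdcDst (kdcWin l i stop) : Int) := by
      rw [kdcRep_size hErep]
    have hsetlen : PySem.Set.len (PySem.Set.ofList (kdcWin l i stop)) =
        (kdcDst (kdcWin l i stop) : Int) := by
      rw [PySem.Set.len_eq]
      rfl
    have hstepB : kdcStepB l (l.length : Int) k ans (i : Int) =
        (if k ≤ (kdcDst (kdcWin l i stop) : Int)
         then ans + ((l.length : Int) - (stop : Int) + 1) else ans) := by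
      simp only [kdcStepB, hscan, hsetlen]
    have hstepA : kdcStepA l (l.length : Int) k (d, (j : Int), ans) (i : Int) =
        ((if ((kdcExtend l k d (j : Int)).1.insert (l[i]'hil)
              ((kdcExtend l k d (j : Int)).1.getD (l[i]'hil) 0 - 1)).getD (l[i]'hil) 0 = 0
          then ((kdcExtend l k d (j : Int)).1.insert (l[i]'hil)
              ((kdcExtend l k d (j : Int)).1.getD (l[i]'hil) 0 - 1)).erase (l[i]'hil)
          else (kdcExtend l k d (j : Int)).1.insert (l[i]'hil)
              ((kdcExtend l k d (j : Int)).1.getD (l[i]'hil) 0 - 1)),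
         (stop : Int),
         (if k ≤ (kdcDst (kdcWin l i stop) : Int)
          then ans + ((l.length : Int) - (stop : Int) + 1) else ans)) := by
      simp only [kdcStepA, hE2, hc, hsize]
      simp only [Prod.mk.injEq]
      refine ⟨trivial, trivial, ?_⟩
      split_ifs
      · ring
      · rfl
    rw [hstepA, hstepB]
    have hrem : kdcRep
        (if ((kdcExtend l k d (j : Int)).1.insert (l[i]'hil)
              ((kdcExtend l k d (j : Int)).1.getD (l[i]'hil) 0 - 1)).getD (l[i]'hil) 0 = 0
         then ((kdcExtend l k d (j : Int)).1.insert (l[i]'hil)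
              ((kdcExtend l k d (j : Int)).1.getD (l[i]'hil) 0 - 1)).erase (l[i]'hil)
         else (kdcExtend l k d (j : Int)).1.insert (l[i]'hil)
              ((kdcExtend l k d (j : Int)).1.getD (l[i]'hil) 0 - 1))
        (kdcWin l (i + 1) stop) := by
      rw [hwin] at hErep
      exact kdcRep_remove hErep
    have hcast : (i : Int) + 1 = ((i + 1 : Nat) : Int) := by push_cast; ring
    rw [hcast]
    exact ih (i + 1) stop _ _ (by omega) hstrict hstople.2 hrem
      (fun m h1 h2 => by
        have ht := kdcDst_tail_le l i m (by omega) hil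
        have h3 := hguard m (by omega) h2
        omega)

lemma kdc_main (s : String) (k : Int) (hpre : Pre_kDistinctCharacters s k) :
    kDistinctCharacters s k = kDistinctCharacters_alt s k := by
  unfold kDistinctCharacters kDistinctCharacters_alt
  by_cases hg : s.toList = [] ∨ (s.toList.length : Int) < k
  · rw [if_pos hg, if_pos hg]
  · rw [if_neg hg, if_neg hg]
    push Not at hg
    have hk : 1 ≤ k := by
      rcases hpre with h | h
      · exact absurd (by rw [h]; rfl) hg.1
      · exact h
    have houter := kdc_outer s.toList k hk s.toList.length 0 0 PySem.Dict.empty 0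
      (by omega) (le_refl 0) (by omega)
      (by rw [kdcWin_self]; exact kdcRep_empty)
      (by intro m h1 h2; omega)
    simpa using houter


-- ===== VERDICT (by name: the statement is the Claim_ definition above) =====
theorem kDistinctCharacters_spec : Claim_equal_kDistinctCharacters := by
  intro s k _ hpre
  exact kdc_main s k hpre
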